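-- pv_equiv track=rewrite | github.com/cycSergio/cs61a | lab08/lab08.py | foo
-- ===== SOURCE A (Python) =====
-- def foo(lst, i):
--     mid = len(lst) // 2
--     if mid == 0:
--         return lst
--     elif i > 0:
--         return foo(lst[mid:], -1)
--     else:
--         return foo(lst[:mid], 1)
-- ===== SOURCE B (Python) =====
-- def foo(lst, i):
--     lo, hi = 0, len(lst)
--     take_right = i > 0
--     while hi - lo >= 2:
--         mid = (hi - lo) // 2
--         if take_right:
--             lo += mid
--         else:
--             hi = lo + mid
--         take_right = not take_right
--     return lst[lo:hi]
-- ===== Notes on version B (the rewrite author's own statement) =====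
-- stated objective: faster
-- what changed: replaced the O(n) recursion that materialises a half-sized list copy at every step by an iterative loop that only updates window indices [lo,hi) and takes one final slice
import Mathlib
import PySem

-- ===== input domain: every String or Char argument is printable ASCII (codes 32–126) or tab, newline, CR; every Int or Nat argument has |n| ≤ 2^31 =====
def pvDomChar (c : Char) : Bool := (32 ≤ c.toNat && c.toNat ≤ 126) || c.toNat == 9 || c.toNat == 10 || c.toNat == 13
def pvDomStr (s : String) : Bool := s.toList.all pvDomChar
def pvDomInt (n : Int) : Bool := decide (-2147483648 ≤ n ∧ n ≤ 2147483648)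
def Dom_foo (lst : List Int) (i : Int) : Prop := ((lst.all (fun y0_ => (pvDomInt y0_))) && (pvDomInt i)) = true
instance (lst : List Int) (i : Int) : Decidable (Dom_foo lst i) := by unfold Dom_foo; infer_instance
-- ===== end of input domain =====

-- B replaces A's copy-a-half-per-step recursion by O(1) window-index updates and one final slice (faster).

-- ===== PORT A =====
def foo (lst : List Int) (i : Int) : List Int :=
  let mid : Nat := lst.length / 2
  if mid = 0 then lst
  else if i > 0 then foo (PySem.List.slice lst (some (mid : Int)) none) (-1)
  else foo (PySem.List.slice lst none (some (mid : Int))) 1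
termination_by lst.length
decreasing_by
  · simp only [PySem.List.slice_from_natCast, List.length_drop]; omega
  · simp only [PySem.List.slice_to_natCast, List.length_take]; omega

-- ===== PORT B =====
-- the while loop of Source B, recursing on the window size hi - lo
def fooLoop (lo hi : Nat) (takeRight : Bool) : Nat × Nat :=
  if 2 ≤ hi - lo then
    let mid := (hi - lo) / 2
    if takeRight then fooLoop (lo + mid) hi (!takeRight)
    else fooLoop lo (lo + mid) (!takeRight)
  else (lo, hi)
termination_by hi - lo
decreasing_by all_goals omega

def foo_alt (lst : List Int) (i : Int) : List Int :=
  let p := fooLoop 0 lst.length (decide (i > 0))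
  PySem.List.slice lst (some (p.1 : Int)) (some (p.2 : Int))

-- ===== PRECONDITION & SPEC =====
def Spec_foo (lst : List Int) (i : Int) (out : List Int) : Prop := out = foo_alt lst i
instance (lst : List Int) (i : Int) (out : List Int) : Decidable (Spec_foo lst i out) := by unfold Spec_foo; infer_instance

-- ===== CLAIM (what is proved, stated in full; the proofs are below) =====
def Claim_equal_foo : Prop := ∀ (lst : List Int) (i : Int), Dom_foo lst i → Spec_foo lst i (foo lst i)

-- ===== LEMMAS AND PROOFS =====

theorem foo_window (n : Nat) : ∀ (lo hi : Nat) (lst : List Int) (i : Int),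
    hi - lo ≤ n → lo ≤ hi → hi ≤ lst.length →
    foo ((lst.drop lo).take (hi - lo)) i =
      (lst.drop (fooLoop lo hi (decide (i > 0))).1).take
        ((fooLoop lo hi (decide (i > 0))).2 - (fooLoop lo hi (decide (i > 0))).1) := by
  induction n with
  | zero =>
    intro lo hi lst i hn hlo hhi
    have hh : hi = lo := by omega
    subst hh
    rw [foo, fooLoop]
    simp
  | succ n ih =>
    intro lo hi lst i hn hlo hhi
    have hlen : ((lst.drop lo).take (hi - lo)).length = hi - lo := by
      simp; omega
    rw [foo, fooLoop]
    simp only [hlen]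
    by_cases hsmall : (hi - lo) / 2 = 0
    · have : ¬ 2 ≤ hi - lo := by omega
      simp [hsmall, this]
    · have h2 : 2 ≤ hi - lo := by omega
      simp only [hsmall, if_pos h2]
      set mid := (hi - lo) / 2 with hmid
      by_cases hpos : i > 0
      · simp only [hpos, decide_true, if_pos]
        rw [PySem.List.slice_from_natCast, List.drop_take, List.drop_drop]
        have e1 : hi - lo - mid = hi - (lo + mid) := by omega
        rw [e1]
        have := ih (lo + mid) hi lst (-1) (by omega) (by omega) hhi
        simpa using this
      · simp only [hpos, decide_false, Bool.false_eq_true, if_false]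
        rw [PySem.List.slice_to_natCast, List.take_take]
        have e1 : min mid (hi - lo) = (lo + mid) - lo := by omega
        rw [e1]
        have := ih lo (lo + mid) lst 1 (by omega) (by omega) (by omega)
        simpa using this

-- ===== VERDICT (by name: the statement is the Claim_ definition above) =====
theorem foo_spec : Claim_equal_foo := by
  intro lst i _
  unfold Spec_foo foo_alt
  have := foo_window lst.length 0 lst.length lst i (by omega) (by omega) (by omega)
  simp only [List.drop_zero, Nat.sub_zero, List.take_length] at this
  rw [this, PySem.List.slice_natCast]
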